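-- pv_equiv track=rewrite | github.com/LeonorLC/LA-II | Treino1/apelidos.py | apelidos
-- ===== SOURCE A (Python) =====
-- import operator
--
-- def apelidos(nomes):
--     d={}
--     for nome in nomes:
--         pal = ''
--         apelidos=0
--         for letra in nome:
--             if letra == ' ':
--                 if pal != '':
--                     apelidos += 1
--                     pal = ''
--             else:
--                 pal += letra
--         if pal != '':
--             apelidos += 1
--             pal = ''
--         d[nome]=apelidos-1
--
--     d_ordenado=sorted(d.items(), key=operator.itemgetter(1))
--
--     lista=[]
--     lista_aux=[]
--     for elem in d_ordenado:
--         if len(lista_aux) == 0: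
--             lista_aux.append(elem)
--         elif lista_aux[0][1] == elem[1]:
--             lista_aux.append(elem)
--         else:
--             lista_aux = sorted(lista_aux)
--             lista = lista + lista_aux
--             lista_aux=[]
--             lista_aux.append(elem)
--
--     lista_aux = sorted(lista_aux)
--     lista = lista + lista_aux
--
--     l_ord=[]
--     for nome in lista:
--         l_ord.append(nome[0])
--
--     return l_ord
-- ===== SOURCE B (Python) =====
-- def apelidos(nomes):
--     d = {}
--     for nome in nomes:
--         d[nome] = sum(1 for p, c in zip(' ' + nome, nome) if p == ' ' and c != ' ') - 1
--     return [n for n, _ in sorted(d.items(), key=lambda kv: (kv[1], kv[0]))]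
-- ===== Notes on version B (the rewrite author's own statement) =====
-- stated objective: simpler
-- what changed: The per-character word-accumulator loop becomes a stateless count of word starts (zip of the string with itself shifted by a space sentinel), and the stable sort by count followed by manual run-grouping and per-group re-sorting collapses into one sorted() call with the tuple key (count, name).
import Mathlib
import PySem

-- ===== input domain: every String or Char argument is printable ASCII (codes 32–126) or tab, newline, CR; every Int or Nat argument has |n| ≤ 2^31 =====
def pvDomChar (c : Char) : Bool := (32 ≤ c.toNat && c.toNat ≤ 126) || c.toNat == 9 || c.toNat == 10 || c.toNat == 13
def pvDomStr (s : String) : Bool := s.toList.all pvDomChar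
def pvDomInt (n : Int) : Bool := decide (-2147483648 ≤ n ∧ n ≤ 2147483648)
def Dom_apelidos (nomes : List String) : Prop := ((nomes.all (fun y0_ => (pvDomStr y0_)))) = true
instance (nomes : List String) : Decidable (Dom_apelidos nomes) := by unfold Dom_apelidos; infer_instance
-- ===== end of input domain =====

-- B replaces A's per-character word accumulator with a stateless count of word starts, and A's
-- stable sort by count + manual run grouping + per-group re-sort with one sort on the key (count, name).

-- ===== PORT A =====
-- inner character loop of A: state = (pal, apelidos)
def pvCountStep (s : List Char × Int) (letra : Char) : List Char × Int :=
  if letra = ' ' then (if s.1 ≠ [] then ([], s.2 + 1) else s)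
  else (s.1 ++ [letra], s.2)

-- the word count A computes for one name (character loop + trailing 'if pal != ""')
def pvCountA (nome : String) : Int :=
  let r := nome.toList.foldl pvCountStep ([], 0)
  if r.1 ≠ [] then r.2 + 1 else r.2

-- A's grouping loop body: state = (lista, lista_aux); sorted(lista_aux) compares tuples lexicographically
def pvGroupStep (s : List (String × Int) × List (String × Int)) (elem : String × Int) :
    List (String × Int) × List (String × Int) :=
  if s.2.length = 0 then (s.1, s.2 ++ [elem])
  else if s.2.headI.2 = elem.2 then (s.1, s.2 ++ [elem])
  else (s.1 ++ PySem.List.sorted2 s.2 Prod.fst Prod.snd, [elem])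

def apelidos (nomes : List String) : List String :=
  let d : PySem.Dict String Int :=
    nomes.foldl (fun d nome => d.insert nome (pvCountA nome - 1)) PySem.Dict.empty
  let d_ordenado := PySem.List.sorted d.items (fun p => p.2)
  let r := d_ordenado.foldl pvGroupStep ([], [])
  let lista := r.1 ++ PySem.List.sorted2 r.2 Prod.fst Prod.snd
  lista.foldl (fun acc p => acc ++ [p.1]) []

-- ===== PORT B =====
-- word count = number of places where a non-space follows a space or the start: zip(' ' + nome, nome)
def pvCountB (nome : String) : Int :=
  (((' ' :: nome.toList).zip nome.toList).countP (fun pc => pc.1 == ' ' && pc.2 != ' ') : Int)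

def apelidos_alt (nomes : List String) : List String :=
  let d : PySem.Dict String Int :=
    nomes.foldl (fun d nome => d.insert nome (pvCountB nome - 1)) PySem.Dict.empty
  (PySem.List.sorted2 d.items (fun kv => kv.2) (fun kv => kv.1)).map Prod.fst

-- ===== PRECONDITION & SPEC =====
def Spec_apelidos (nomes : List String) (out : List String) : Prop := out = apelidos_alt nomes
instance (nomes : List String) (out : List String) : Decidable (Spec_apelidos nomes out) := by unfold Spec_apelidos; infer_instance

-- ===== CLAIM (what is proved, stated in full; the proofs are below) =====
def Claim_equal_apelidos : Prop := ∀ (nomes : List String), Dom_apelidos nomes → Spec_apelidos nomes (apelidos nomes)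

-- ===== LEMMAS AND PROOFS =====

-- reference word counter: b = "the previous character was a space (or we are at the start)"
def pvWc (b : Bool) : List Char → Int
  | [] => 0
  | c :: t => (if b && (c != ' ') then 1 else 0) + pvWc (c == ' ') t

-- the two sort keys visible in the Python, as lexicographically ordered pair types
def keyCN (p : String × Int) : Lex (Int × String) := toLex (p.2, p.1)
def keyNC (p : String × Int) : Lex (String × Int) := toLex (p.1, p.2)

lemma countA_eq_wc : ∀ (l : List Char) (pal : List Char) (cnt : Int),
    (if (l.foldl pvCountStep (pal, cnt)).1 ≠ [] then (l.foldl pvCountStep (pal, cnt)).2 + 1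
     else (l.foldl pvCountStep (pal, cnt)).2)
      = cnt + (if pal ≠ [] then 1 else 0) + pvWc pal.isEmpty l := by
  intro l
  induction l with
  | nil =>
    intro pal cnt
    simp only [List.foldl_nil, pvWc]
    split <;> simp_all
  | cons c t ih =>
    intro pal cnt
    simp only [List.foldl_cons, pvCountStep, pvWc]
    by_cases hc : c = ' '
    · subst hc
      simp only [if_pos rfl]
      by_cases hp : pal = []
      · subst hp
        simp only [ne_eq, not_true_eq_false, if_false, ite_self]
        rw [ih]
        simp [pvWc]
      · rw [if_pos hp, ih]
        simp [hp]
    · have hb : (c == ' ') = false := by simp [hc]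
      rw [if_neg hc, ih]
      by_cases hp : pal = []
      · subst hp
        simp [hb, hc]
        ring
      · have : (pal ++ [c]).isEmpty = false := by simp
        simp [hp, hb, this]
lemma countB_eq_wc : ∀ (l : List Char) (prev : Char),
    (((prev :: l).zip l).countP (fun pc => pc.1 == ' ' && pc.2 != ' ') : Int)
      = pvWc (prev == ' ') l := by
  intro l
  induction l with
  | nil => intro prev; simp [pvWc]
  | cons c t ih =>
    intro prev
    simp only [List.zip_cons_cons, List.countP_cons, pvWc, ← ih c]
    by_cases h : prev = ' ' <;> by_cases h2 : c = ' ' <;> simp [h, h2] <;> push_cast <;> ring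

lemma sorted2_eq_sorted_lex {α : Type} {κ₁ κ₂ : Type} [LinearOrder κ₁] [LinearOrder κ₂]
    (xs : List α) (k1 : α → κ₁) (k2 : α → κ₂) :
    PySem.List.sorted2 xs k1 k2 = PySem.List.sorted xs (fun x => toLex (k1 x, k2 x)) := by
  unfold PySem.List.sorted2 PySem.List.sorted
  simp only [Bool.false_eq_true, if_false]
  congr 1
  funext acc x
  congr 1
  funext a b
  by_cases h1 : k1 a < k1 b <;> by_cases h2 : k1 b < k1 a
  · exact absurd h2 (lt_asymm h1)
  · simp [Prod.Lex.toLex_lt_toLex, h1, h2]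
  · simp [Prod.Lex.toLex_lt_toLex, h1, h2]
    intro h; rw [h] at h2; exact absurd (le_refl _) (not_le.mpr h2)
  · have he : k1 a = k1 b := le_antisymm (not_lt.mp h2) (not_lt.mp h1)
    simp [Prod.Lex.toLex_lt_toLex, h1, h2, he]

lemma keyCN_injective : Function.Injective keyCN := by
  intro p q h
  have : (p.2, p.1) = (q.2, q.1) := toLex.injective h
  exact Prod.ext (congrArg Prod.snd this) (congrArg Prod.fst this)

lemma keyCN_lt_of_snd_lt {a b : String × Int} (h : a.2 < b.2) : keyCN a < keyCN b := by
  simp [keyCN, Prod.Lex.toLex_lt_toLex, h]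

lemma keyCN_lt_of_snd_eq {a b : String × Int} (h2 : a.2 = b.2) (h1 : a.1 < b.1) :
    keyCN a < keyCN b := by
  simp [keyCN, Prod.Lex.toLex_lt_toLex, h2, h1]

lemma sorted2_eq_sorted_keyNC (X : List (String × Int)) :
    PySem.List.sorted2 X Prod.fst Prod.snd = PySem.List.sorted X keyNC := by
  exact sorted2_eq_sorted_lex X Prod.fst Prod.snd

lemma sortedNC_pairwise_strict (X : List (String × Int)) (v : Int)
    (hX : (X.map Prod.fst).Nodup) (hv : ∀ b ∈ X, b.2 = v) :
    (PySem.List.sorted X keyNC).Pairwise (fun a b => keyCN a < keyCN b) := by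
  have hperm : (PySem.List.sorted X keyNC).Perm X := PySem.List.sorted_perm X keyNC false
  have hnd : ((PySem.List.sorted X keyNC).map Prod.fst).Nodup :=
    ((hperm.map Prod.fst).nodup_iff).mpr hX
  have hne : (PySem.List.sorted X keyNC).Pairwise (fun a b => a.1 ≠ b.1) :=
    List.pairwise_map.mp hnd
  have hle : (PySem.List.sorted X keyNC).Pairwise (fun a b => keyNC a ≤ keyNC b) :=
    PySem.List.sorted_pairwise X keyNC
  refine (hle.and hne).imp_of_mem ?_
  intro a b ha hb hh
  have hva : a.2 = v := hv a ((PySem.List.mem_sorted _ _ _ _).mp ha)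
  have hvb : b.2 = v := hv b ((PySem.List.mem_sorted _ _ _ _).mp hb)
  rcases lt_or_eq_of_le hh.1 with h | h
  · rcases Prod.Lex.toLex_lt_toLex.mp h with h1 | h1
    · exact keyCN_lt_of_snd_eq (hva.trans hvb.symm) h1
    · exact absurd h1.1 hh.2
  · exact absurd (congrArg (fun q => (ofLex q).1) h) hh.2

lemma flushed_pairwise (L X : List (String × Int)) (v : Int)
    (hL : L.Pairwise (fun a b => keyCN a < keyCN b))
    (hX : (X.map Prod.fst).Nodup)
    (hv : ∀ b ∈ X, b.2 = v)
    (hLX : ∀ a ∈ L, ∀ b ∈ X, a.2 < b.2) :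
    (L ++ PySem.List.sorted X keyNC).Pairwise (fun a b => keyCN a < keyCN b) := by
  refine List.pairwise_append.mpr ⟨hL, sortedNC_pairwise_strict X v hX hv, ?_⟩
  intro a ha b hb
  exact keyCN_lt_of_snd_lt (hLX a ha b ((PySem.List.mem_sorted _ _ _ _).mp hb))

lemma group_spec : ∀ (ys L X : List (String × Int)),
    (((L ++ X ++ ys).map Prod.fst).Nodup) →
    ((X ++ ys).Pairwise (fun a b => a.2 ≤ b.2)) →
    (∀ b ∈ X, b.2 = X.headI.2) →
    (L.Pairwise (fun a b => keyCN a < keyCN b)) →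
    (∀ a ∈ L, ∀ b ∈ X ++ ys, a.2 < b.2) →
    ((ys.foldl pvGroupStep (L, X)).1 ++
        PySem.List.sorted (ys.foldl pvGroupStep (L, X)).2 keyNC).Perm (L ++ X ++ ys) ∧
    ((ys.foldl pvGroupStep (L, X)).1 ++
        PySem.List.sorted (ys.foldl pvGroupStep (L, X)).2 keyNC).Pairwise
        (fun a b => keyCN a < keyCN b) := by
  intro ys
  induction ys with
  | nil =>
    intro L X h1 h2 h3 h4 h5
    simp only [List.foldl_nil, List.append_nil] at *
    constructor
    · exact (PySem.List.sorted_perm X keyNC false).append_left L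
    · refine flushed_pairwise L X X.headI.2 h4 ?_ h3 h5
      have := (by simpa [List.map_append] using h1 :
        (L.map Prod.fst ++ X.map Prod.fst).Nodup)
      exact this.of_append_right
  | cons e t ih =>
    intro L X h1 h2 h3 h4 h5
    rw [List.foldl_cons]
    by_cases hX0 : X.length = 0
    · have hXnil : X = [] := List.length_eq_zero_iff.mp hX0
      subst hXnil
      have hstep : pvGroupStep (L, []) e = (L, [e]) := by simp [pvGroupStep]
      rw [hstep]
      have := ih L [e] (by simpa using h1) (by simpa using h2)
        (by intro b hb; simp at hb; subst hb; rfl) h4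
        (by intro a ha b hb; exact h5 a ha b (by simpa using hb))
      simpa using this
    · have hXne : X ≠ [] := by intro h; rw [h] at hX0; exact hX0 rfl
      by_cases heq : X.headI.2 = e.2
      · have hstep : pvGroupStep (L, X) e = (L, X ++ [e]) := by
          simp [pvGroupStep, hX0, heq]
        rw [hstep]
        have hassoc : (X ++ [e]) ++ t = X ++ (e :: t) := by simp
        have := ih L (X ++ [e])
          (by
            have : L ++ (X ++ [e]) ++ t = L ++ X ++ (e :: t) := by simp
            rw [this]; exact h1)
          (by rw [hassoc]; exact h2)
          (by
            intro b hb
            have hhead : (X ++ [e]).headI = X.headI := by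
              cases X with
              | nil => exact absurd rfl hXne
              | cons x xs => rfl
            rw [hhead]
            rcases List.mem_append.mp hb with h | h
            · exact h3 b h
            · simp at h; rw [h, ← heq]) h4
          (by
            intro a ha b hb
            refine h5 a ha b ?_
            have : b ∈ X ++ (e :: t) := by
              rw [← hassoc]
              simpa using hb
            exact this)
        have hre : L ++ (X ++ [e]) ++ t = L ++ X ++ (e :: t) := by simp
        rw [hre] at this
        exact this
      · have hstep : pvGroupStep (L, X) e =
            (L ++ PySem.List.sorted X keyNC, [e]) := by
          simp [pvGroupStep, hX0, heq, sorted2_eq_sorted_keyNC]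
        rw [hstep]
        have hcross : ∀ x ∈ X, ∀ y ∈ e :: t, x.2 ≤ y.2 := (List.pairwise_append.mp h2).2.2
        have hhm : X.headI ∈ X := (by
          cases X with
          | nil => exact absurd rfl hXne
          | cons x xs => exact List.mem_cons_self)
        have hvlt : X.headI.2 < e.2 :=
          lt_of_le_of_ne (hcross _ hhm e (List.mem_cons_self)) heq
        have het : (e :: t).Pairwise (fun a b => a.2 ≤ b.2) := (List.pairwise_append.mp h2).2.1
        have hSperm : (PySem.List.sorted X keyNC).Perm X := PySem.List.sorted_perm X keyNC false
        have hXnd : (X.map Prod.fst).Nodup := by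
          have h1' := (by simpa [List.map_append] using h1 :
            ((L.map Prod.fst ++ X.map Prod.fst) ++ (e :: t).map Prod.fst).Nodup)
          exact (h1'.of_append_left).of_append_right
        have hbig : ((L ++ PySem.List.sorted X keyNC) ++ ([e] ++ t)).Perm (L ++ X ++ (e :: t)) := by
          rw [List.append_assoc, List.append_assoc]
          exact List.Perm.append_left L (by simpa using hSperm.append_right (e :: t))
        have hL' : (L ++ PySem.List.sorted X keyNC).Pairwise (fun a b => keyCN a < keyCN b) :=
          flushed_pairwise L X X.headI.2 h4 hXnd h3
            (fun a ha b hb => h5 a ha b (List.mem_append_left _ hb))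
        have := ih (L ++ PySem.List.sorted X keyNC) [e]
          (by
            have := (hbig.map Prod.fst).nodup_iff.mpr (by simpa using h1)
            simpa using this)
          (by simpa using het)
          (by intro b hb; simp at hb; subst hb; rfl) hL'
          (by
            intro a ha b hb
            have hbet : b ∈ e :: t := by simpa using hb
            have hebb : e.2 ≤ b.2 := by
              rcases hbet with _ | hbt
              · exact le_refl _
              · exact (List.pairwise_cons.mp het).1 b (by assumption)
            rcases List.mem_append.mp ha with hA | hS
            · exact lt_of_lt_of_le (h5 a hA e (by simp)) hebb
            · have : a.2 = X.headI.2 := h3 a ((PySem.List.mem_sorted _ _ _ _).mp hS)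
              rw [this]; exact lt_of_lt_of_le hvlt hebb)
        constructor
        · refine this.1.trans ?_
          have : L ++ PySem.List.sorted X keyNC ++ [e] ++ t
              = L ++ PySem.List.sorted X keyNC ++ ([e] ++ t) := by simp
          rw [this]
          exact hbig
        · exact this.2

lemma countA_eq_countB : pvCountA = pvCountB := by
  funext nome
  show (if (nome.toList.foldl pvCountStep ([], 0)).1 ≠ [] then
          (nome.toList.foldl pvCountStep ([], 0)).2 + 1
        else (nome.toList.foldl pvCountStep ([], 0)).2) = pvCountB nome
  rw [countA_eq_wc nome.toList [] 0]
  unfold pvCountB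
  rw [countB_eq_wc nome.toList ' ']
  simp

theorem apelidos_spec : Claim_equal_apelidos := by
  intro nomes _hdom
  show apelidos nomes = apelidos_alt nomes
  simp only [apelidos, apelidos_alt, countA_eq_countB]
  set d : PySem.Dict String Int :=
    nomes.foldl (fun d nome => d.insert nome (pvCountB nome - 1)) PySem.Dict.empty with hd
  set ys := PySem.List.sorted d.items (fun p => p.2) with hys
  have hkeys : d.keys.Nodup := by
    rw [hd]
    exact PySem.Dict.nodup_keys_foldl_insert nomes (fun d nome => pvCountB nome - 1)
      PySem.Dict.empty (by simp [PySem.Dict.keys, PySem.Dict.empty])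
  have hnd : (d.items.map Prod.fst).Nodup := hkeys
  have hys_perm : ys.Perm d.items := PySem.List.sorted_perm d.items (fun p => p.2) false
  have hgs := group_spec ys [] []
    (by simpa using (hys_perm.map Prod.fst).nodup_iff.mpr hnd)
    (by simpa using PySem.List.sorted_pairwise d.items (fun p => p.2))
    (by intro b hb; simp at hb)
    (by simp)
    (by intro a ha; simp at ha)
  rw [sorted2_eq_sorted_keyNC]
  rw [PySem.List.foldl_append_singleton_eq_map]
  set r := ys.foldl pvGroupStep ([], []) with hr
  have hperm : (r.1 ++ PySem.List.sorted r.2 keyNC).Perm ys := by simpa using hgs.1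
  have hlist : PySem.List.sorted ys keyCN = r.1 ++ PySem.List.sorted r.2 keyNC :=
    PySem.List.sorted_eq_of_perm_of_pairwise_lt ys _ keyCN hperm hgs.2
  rw [sorted2_eq_sorted_lex d.items (fun kv => kv.2) (fun kv => kv.1)]
  rw [show (fun x : String × Int => toLex ((fun kv : String × Int => kv.2) x,
      (fun kv : String × Int => kv.1) x)) = keyCN from rfl]
  rw [← PySem.List.sorted_eq_sorted_of_perm ys d.items keyCN keyCN_injective hys_perm]
  rw [hlist]
  simp
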